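-- pv_equiv track=rewrite | github.com/smallwanderer/joooooon | 프로그래머스/3/12927. 야근 지수/야근 지수.py | distribute_reduce
-- ===== SOURCE A (Python) =====
-- def distribute_reduce(n, num, num_count):
--   base_reduce = n // num_count
--   extra_reduce = n % num_count
--
--   if num-base_reduce < 0:
--     return 0
--
--   result = [num-base_reduce] * num_count
--
--   for i in range(extra_reduce):
--     result[i] -= 1
--     if result[i] < 0:
--       return 0
--
--   return sum(x*x for x in result)
-- ===== SOURCE B (Python) =====
-- def distribute_reduce(n, num, num_count):
--     base, extra = divmod(n, num_count)
--     a = num - base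
--     if a < 0 or (a == 0 and extra > 0):
--         return 0
--     return extra * (a - 1) ** 2 + (num_count - extra) * a ** 2
-- ===== Notes on version B (the rewrite author's own statement) =====
-- stated objective: faster
-- what changed: Replaced building a num_count-sized list, the decrement loop and the final sum-of-squares scan by a closed-form O(1) formula: extra entries equal a-1 and the rest equal a, so the answer is extra*(a-1)^2 + (num_count-extra)*a^2.
-- outside the precondition, e.g. on distribute_reduce(5, 3, -2): A returns 0, B returns -61; on distribute_reduce(5, 3, 0): A raises ZeroDivisionError, B raises ZeroDivisionError
import Mathlib
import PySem

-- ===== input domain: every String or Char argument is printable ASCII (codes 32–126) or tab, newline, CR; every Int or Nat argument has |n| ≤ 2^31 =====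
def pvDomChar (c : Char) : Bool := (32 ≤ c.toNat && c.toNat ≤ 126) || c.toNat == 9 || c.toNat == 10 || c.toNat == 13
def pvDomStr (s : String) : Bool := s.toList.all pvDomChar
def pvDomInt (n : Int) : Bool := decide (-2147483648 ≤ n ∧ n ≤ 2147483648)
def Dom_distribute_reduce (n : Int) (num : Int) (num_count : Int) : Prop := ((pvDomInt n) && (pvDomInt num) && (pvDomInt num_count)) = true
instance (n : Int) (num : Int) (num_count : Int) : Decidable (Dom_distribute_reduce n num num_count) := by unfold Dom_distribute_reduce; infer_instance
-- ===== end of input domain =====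

-- B replaces A's list build + decrement loop + sum scan by a closed-form O(1) formula (objective: faster).

-- ===== PORT A =====
-- the for-loop: for i in range(extra_reduce): result[i] -= 1; if result[i] < 0: return 0
-- none = early 'return 0'. Indexing uses getD: under Pre_ (num_count ≥ 1) the loop index is
-- always in range, so this is exact there (Python could raise IndexError only out of range).
def pvALoop (result : List Int) (i : Nat) (fuel : Nat) : Option (List Int) :=
  match fuel with
  | 0 => some result
  | fuel + 1 =>
    let r := result.set i (result.getD i 0 - 1)
    if r.getD i 0 < 0 then none else pvALoop r (i + 1) fuel

def distribute_reduce (n : Int) (num : Int) (num_count : Int) : Int :=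
  let base_reduce := PySem.Int.floordiv n num_count
  let extra_reduce := PySem.Int.mod n num_count
  if num - base_reduce < 0 then 0
  else
    let result := List.replicate num_count.toNat (num - base_reduce)
    match pvALoop result 0 extra_reduce.toNat with
    | none => 0
    | some r => (r.map (fun x => x * x)).sum

-- ===== PORT B =====
def distribute_reduce_alt (n : Int) (num : Int) (num_count : Int) : Int :=
  let base := PySem.Int.floordiv n num_count
  let extra := PySem.Int.mod n num_count
  let a := num - base
  if a < 0 ∨ (a = 0 ∧ extra > 0) then 0
  else extra * (a - 1) ^ 2 + (num_count - extra) * a ^ 2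

-- ===== PRECONDITION & SPEC =====
-- Pre_ restricts to the task's natural domain num_count ≥ 1 (a positive count of entries):
-- num_count = 0 makes A raise ZeroDivisionError, and for num_count < 0 A's value 0 is an
-- accident of list multiplication by a negative count yielding an empty list.
def Pre_distribute_reduce (n : Int) (num : Int) (num_count : Int) : Prop := 1 ≤ num_count
instance (n : Int) (num : Int) (num_count : Int) : Decidable (Pre_distribute_reduce n num num_count) := by unfold Pre_distribute_reduce; infer_instance
def pvWitness_distribute_reduce : Int × Int × Int := (7, 4, 3)

def Spec_distribute_reduce (n : Int) (num : Int) (num_count : Int) (out : Int) : Prop := out = distribute_reduce_alt n num num_count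
instance (n : Int) (num : Int) (num_count : Int) (out : Int) : Decidable (Spec_distribute_reduce n num num_count out) := by unfold Spec_distribute_reduce; infer_instance

-- ===== CLAIM (what is proved, stated in full; the proofs are below) =====
def Claim_equal_distribute_reduce : Prop := ∀ (n : Int) (num : Int) (num_count : Int), Dom_distribute_reduce n num num_count → Pre_distribute_reduce n num num_count → Spec_distribute_reduce n num num_count (distribute_reduce n num num_count)

-- ===== LEMMAS AND PROOFS =====

theorem getD_rep (c a d : Int) (j m : Nat) :
    (List.replicate j c ++ List.replicate (m + 1) a).getD j d = a := by
  induction j with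
  | zero => simp [List.replicate_succ]
  | succ j ih => simpa [List.replicate_succ] using ih

theorem set_rep (c a x : Int) (j m : Nat) :
    (List.replicate j c ++ List.replicate (m + 1) a).set j x
      = List.replicate j c ++ x :: List.replicate m a := by
  induction j with
  | zero => simp [List.replicate_succ]
  | succ j ih => simpa [List.replicate_succ] using ih

theorem rep_cons (c : Int) (j : Nat) (t : List Int) :
    List.replicate j c ++ c :: t = List.replicate (j + 1) c ++ t := by
  rw [List.replicate_succ' (n := j), List.append_assoc]; rfl

-- the loop, started at index j on j copies of (a-1) followed by m copies of a, with a ≥ 1,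
-- never aborts and after k ≤ m steps has turned k more copies of a into a-1
theorem pvALoop_spec (a : Int) (ha : 1 ≤ a) :
    ∀ (k j m : Nat), k ≤ m →
      pvALoop (List.replicate j (a - 1) ++ List.replicate m a) j k
        = some (List.replicate (j + k) (a - 1) ++ List.replicate (m - k) a) := by
  intro k
  induction k with
  | zero => intro j m _; simp [pvALoop]
  | succ k ih =>
    intro j m hk
    obtain ⟨m', rfl⟩ : ∃ m', m = m' + 1 := ⟨m - 1, by omega⟩
    show pvALoop _ j (k + 1) = _
    rw [pvALoop]
    simp only [getD_rep, set_rep]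
    have hget : (List.replicate j (a - 1) ++ (a - 1) :: List.replicate m' a).getD j 0 = a - 1 := by
      have h := getD_rep (a - 1) (a - 1) 0 j m'
      simpa [List.replicate_succ] using h
    rw [hget]
    rw [if_neg (show ¬ (a - 1 < 0) by omega), rep_cons]
    rw [ih (j + 1) m' (by omega)]
    rw [show j + 1 + k = j + (k + 1) by omega, show m' - k = m' + 1 - (k + 1) by omega]

theorem sum_sq_replicate (m : Nat) (x : Int) :
    ((List.replicate m x).map (fun y => y * y)).sum = (m : Int) * x ^ 2 := by
  induction m with
  | zero => simp
  | succ m ih => simp [List.replicate_succ]; ring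

-- both sides of the claim, with the division already performed (0 ≤ e < c, 1 ≤ c)
theorem pv_key (a e c : Int) (he0 : 0 ≤ e) (hec : e < c) (hc : 1 ≤ c) :
    (if a < 0 then 0
     else
       match pvALoop (List.replicate c.toNat a) 0 e.toNat with
       | none => 0
       | some r => ((r.map (fun x => x * x)).sum : Int))
    = (if a < 0 ∨ (a = 0 ∧ e > 0) then 0
       else e * (a - 1) ^ 2 + (c - e) * a ^ 2) := by
  by_cases h1 : a < 0
  · rw [if_pos h1, if_pos (Or.inl h1)]
  · rw [if_neg h1]
    have hcnt : (c.toNat : Int) = c := Int.toNat_of_nonneg (by omega)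
    have hext : (e.toNat : Int) = e := Int.toNat_of_nonneg he0
    have hle : e.toNat ≤ c.toNat := by omega
    by_cases h2 : a = 0 ∧ e > 0
    · rw [if_pos (Or.inr h2)]
      obtain ⟨ha0, hep⟩ := h2
      obtain ⟨e', he'⟩ : ∃ e', e.toNat = e' + 1 := ⟨e.toNat - 1, by omega⟩
      obtain ⟨c', hc'⟩ : ∃ c', c.toNat = c' + 1 := ⟨c.toNat - 1, by omega⟩
      rw [he', hc', ha0]
      rw [pvALoop]
      simp [List.replicate_succ]
    · rw [if_neg (show ¬ (a < 0 ∨ (a = 0 ∧ e > 0)) from fun h => h.elim h1 h2)]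
      by_cases h3 : e > 0
      · have ha1 : 1 ≤ a := by
          rcases lt_or_ge a 1 with h | h
          · exact absurd ⟨by omega, h3⟩ h2
          · exact h
        have hloop := pvALoop_spec a ha1 e.toNat 0 c.toNat hle
        simp only [List.replicate_zero, List.nil_append, Nat.zero_add] at hloop
        rw [hloop]
        show ((List.replicate e.toNat (a - 1) ++ List.replicate (c.toNat - e.toNat) a).map
              (fun x => x * x)).sum = _
        rw [List.map_append, List.sum_append, sum_sq_replicate, sum_sq_replicate, hext]
        rw [show ((c.toNat - e.toNat : Nat) : Int) = c - e by omega]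
      · have he0' : e = 0 := by omega
        have he0n : e.toNat = 0 := by omega
        rw [he0n, pvALoop]
        show ((List.replicate c.toNat a).map (fun x => x * x)).sum = _
        rw [sum_sq_replicate, hcnt, he0']
        ring

-- ===== VERDICT (by name: the statement is the Claim_ definition above) =====
theorem distribute_reduce_spec : Claim_equal_distribute_reduce := by
  intro n num num_count _ hpre
  have hc : 1 ≤ num_count := hpre
  have hmod : PySem.Int.mod n num_count = n % num_count :=
    PySem.Int.mod_eq_emod_of_pos (by omega)
  have hex0 : 0 ≤ PySem.Int.mod n num_count := by
    rw [hmod]; exact Int.emod_nonneg n (by omega)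
  have hexlt : PySem.Int.mod n num_count < num_count := by
    rw [hmod]; exact Int.emod_lt_of_pos n (by omega)
  show distribute_reduce n num num_count = distribute_reduce_alt n num num_count
  exact pv_key (num - PySem.Int.floordiv n num_count) (PySem.Int.mod n num_count)
    num_count hex0 hexlt hc
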